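-- pv_equiv track=rewrite | github.com/andrew-rosario/CMPUT404-assignment-web-client | httpclient.py | get_subdirectory
-- ===== SOURCE A (Python) =====
-- def get_subdirectory(url):
--     index_start = 0
--     index_end = 0
--     count = 0
--     for character in url:
--         if index_end == 0:
--             if character == "/":
--                 count += 1
--                 if count == 3:
--                     break
--             elif index_start + 1 == len(url):
--                 return "/"
--             index_start += 1
--     # http://google.com
--     return url[index_start:len(url)]
-- ===== SOURCE B (Python) =====
-- def get_subdirectory(url):
--     parts = url.split('/')
--     if len(parts) > 3:
--         return '/' + '/'.join(parts[3:])
--     if url and not url.endswith('/'):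
--         return '/'
--     return ''
-- ===== Notes on version B (the rewrite author's own statement) =====
-- stated objective: simpler
-- what changed: Replaces A's per-character scan (counting slashes while threading the fallback return and index bookkeeping through the loop) with a tokenize-and-rejoin approach: split the URL on the slash separator once and rebuild the subdirectory from the pieces after the third, with a plain fallback block and no index arithmetic.
import Mathlib
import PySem

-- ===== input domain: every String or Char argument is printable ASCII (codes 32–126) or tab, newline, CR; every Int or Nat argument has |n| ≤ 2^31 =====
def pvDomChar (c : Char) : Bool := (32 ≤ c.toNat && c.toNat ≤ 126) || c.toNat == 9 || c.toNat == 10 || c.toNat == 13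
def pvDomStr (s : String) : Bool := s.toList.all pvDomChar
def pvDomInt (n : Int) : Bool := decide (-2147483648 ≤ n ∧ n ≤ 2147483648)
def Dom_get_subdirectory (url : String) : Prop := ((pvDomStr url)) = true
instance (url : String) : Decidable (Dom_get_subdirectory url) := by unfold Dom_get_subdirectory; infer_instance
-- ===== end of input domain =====

-- B replaces A's per-character scan (which counts slashes while threading the '/'-fallback
-- through the loop) by a tokenize-and-rejoin decomposition: split on '/', rebuild from the
-- pieces after the third, plain fallback block — simpler, no index arithmetic.

-- ===== PORT A =====
-- A's for-loop: early `return "/"` becomes none, break / normal loop exit yield some index_start;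
-- iEnd is A's (always-zero) variable index_end, kept for faithfulness.
def getSubAuxA (len : Nat) : List Char → Nat → Nat → Nat → Option Nat
  | [], iStart, _iEnd, _count => some iStart
  | c :: rest, iStart, iEnd, count =>
    if iEnd = 0 then
      if c = '/' then
        if count + 1 = 3 then some iStart
        else getSubAuxA len rest (iStart + 1) iEnd (count + 1)
      else if iStart + 1 = len then none
      else getSubAuxA len rest (iStart + 1) iEnd count
    else getSubAuxA len rest iStart iEnd count

def get_subdirectory (url : String) : String :=
  let cs := url.toList
  match getSubAuxA cs.length cs 0 0 0 with
  | none => "/"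
  | some i => String.ofList (PySem.List.slice cs (some (i : Int)) (some (cs.length : Int)))

-- ===== PORT B =====
def get_subdirectory_alt (url : String) : String :=
  let parts := PySem.Chars.splitOn url.toList ['/']
  if 3 < parts.length then
    String.ofList ('/' :: PySem.Chars.join ['/'] (PySem.List.slice parts (some 3) none))
  else if !url.toList.isEmpty && !(PySem.Chars.endswith url.toList ['/']) then "/"
  else ""

-- ===== PRECONDITION & SPEC =====
def Spec_get_subdirectory (url : String) (out : String) : Prop := out = get_subdirectory_alt url
instance (url : String) (out : String) : Decidable (Spec_get_subdirectory url out) := by unfold Spec_get_subdirectory; infer_instance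

-- ===== CLAIM (what is proved, stated in full; the proofs are below) =====
def Claim_equal_get_subdirectory : Prop := ∀ (url : String), Dom_get_subdirectory url → Spec_get_subdirectory url (get_subdirectory url)

-- ===== LEMMAS AND PROOFS =====

-- index (0-based) of the k-th '/' (k counted from 1) in a char list
def nthSlash : List Char → Nat → Option Nat
  | [], _ => none
  | c :: r, k =>
    if c = '/' then
      if k ≤ 1 then some 0 else (nthSlash r (k - 1)).map (· + 1)
    else (nthSlash r k).map (· + 1)

-- characterisation of A's loop: it finds the (3 - count)-th slash, or falls back
theorem getSubAuxA_eq (len : Nat) (cs : List Char) : ∀ (i count : Nat), count < 3 →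
    i + cs.length = len →
    getSubAuxA len cs i 0 count =
      match nthSlash cs (3 - count) with
      | some j => some (i + j)
      | none => if cs ≠ [] ∧ cs.getLast? ≠ some '/' then none else some (i + cs.length) := by
  induction cs with
  | nil => intro i count _ _; simp [getSubAuxA, nthSlash]
  | cons c rest ih =>
    intro i count hcount hlen
    simp only [getSubAuxA]
    by_cases hc : c = '/'
    · rw [if_pos hc]
      by_cases h3 : count + 1 = 3
      · rw [if_pos h3]
        have hle : 3 - count ≤ 1 := by omega
        simp [nthSlash, hc, hle]
      · rw [if_neg h3]
        rw [ih (i + 1) (count + 1) (by omega) (by simp at hlen ⊢; omega)]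
        have hk : ¬ (3 - count ≤ 1) := by omega
        have hk' : 3 - count - 1 = 3 - (count + 1) := by omega
        simp only [nthSlash, if_pos hc, if_neg hk, hk']
        cases hrest : nthSlash rest (3 - (count + 1)) with
        | some j => simp; omega
        | none =>
          simp only [Option.map_none]
          cases rest with
          | nil => simp [hc]
          | cons d s =>
            simp only [List.getLast?_cons_cons, ne_eq, List.cons_ne_nil, not_false_iff,
              true_and, List.length_cons]
            split_ifs <;> simp <;> omega
    · rw [if_neg hc]
      by_cases hlast : i + 1 = len
      · rw [if_pos hlast]
        have hrest : rest = [] := by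
          simp at hlen
          have : rest.length = 0 := by omega
          exact List.eq_nil_of_length_eq_zero this
        subst hrest
        simp [nthSlash, hc]
      · rw [if_neg hlast]
        rw [ih (i + 1) count hcount (by simp at hlen ⊢; omega)]
        have hrestne : rest ≠ [] := by
          intro h; subst h; simp at hlen; omega
        simp only [nthSlash, if_neg hc]
        cases hrest : nthSlash rest (3 - count) with
        | some j => simp; omega
        | none =>
          simp only [Option.map_none]
          cases rest with
          | nil => exact absurd rfl hrestne
          | cons d s =>
            simp only [List.getLast?_cons_cons, ne_eq, List.cons_ne_nil, not_false_iff,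
              true_and, List.length_cons]
            split_ifs <;> simp <;> omega

-- ['/'] is a suffix iff the last char is '/'
theorem endswith_slash_iff (cs : List Char) :
    PySem.Chars.endswith cs ['/'] = true ↔ cs.getLast? = some '/' := by
  rw [PySem.Chars.endswith_iff]
  constructor
  · rintro ⟨t, rfl⟩
    simp [List.getLast?_append]
  · intro h
    rcases List.getLast?_eq_some_iff.mp h with ⟨t, rfl⟩
    exact ⟨t, rfl⟩

-- common reference value: the slice from the third slash, else A's/B's shared fallback
def refSub (cs : List Char) : String :=
  match nthSlash cs 3 with
  | some j => String.ofList (cs.drop j)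
  | none => if cs ≠ [] ∧ cs.getLast? ≠ some '/' then "/" else ""

theorem a_eq (cs : List Char) :
    (match getSubAuxA cs.length cs 0 0 0 with
     | none => "/"
     | some i => String.ofList (PySem.List.slice cs (some (i : Int)) (some (cs.length : Int)))) =
      refSub cs := by
  rw [getSubAuxA_eq cs.length cs 0 0 (by omega) (by omega)]
  cases h3 : nthSlash cs 3 with
  | some j =>
    simp only [refSub, h3, Nat.zero_add]
    rw [PySem.List.slice_natCast]
    congr 1
    have hl : cs.length - j = (cs.drop j).length := by simp
    rw [hl, List.take_length]
  | none =>
    simp only [refSub, h3]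
    by_cases hcond : cs ≠ [] ∧ cs.getLast? ≠ some '/'
    · simp [hcond]
    · rw [if_neg hcond, if_neg hcond]
      simp [PySem.List.slice_natCast]

-- ===== B side: split on '/' =====

-- structural specification of str.split('/')
def splitSlash : List Char → List (List Char)
  | [] => [[]]
  | c :: r =>
    if c = '/' then [] :: splitSlash r
    else match splitSlash r with
      | [] => [[c]]
      | h :: t => (c :: h) :: t

theorem splitSlash_ne_nil (cs : List Char) : splitSlash cs ≠ [] := by
  cases cs with
  | nil => simp [splitSlash]
  | cons c r =>
    simp only [splitSlash]
    split_ifs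
    · simp
    · cases h : splitSlash r <;> simp

def consHead (pre : List Char) : List (List Char) → List (List Char)
  | [] => [pre]
  | h :: t => (pre ++ h) :: t

theorem splitOn_go_eq (cs : List Char) : ∀ (fuel : Nat) (cur : List Char) (acc : List (List Char)),
    cs.length < fuel →
    PySem.Chars.splitOn.go ['/'] fuel cs cur acc =
      acc.reverse ++ consHead cur.reverse (splitSlash cs) := by
  induction cs with
  | nil =>
    intro fuel cur acc hf
    cases fuel with
    | zero => omega
    | succ f => simp [PySem.Chars.splitOn.go, splitSlash, consHead]
  | cons c rest ih =>
    intro fuel cur acc hf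
    cases fuel with
    | zero => omega
    | succ f =>
      by_cases hc : c = '/'
      · have hpre : (['/'].isPrefixOf (c :: rest)) = true := by
          simp [List.isPrefixOf, hc]
        rw [show PySem.Chars.splitOn.go ['/'] (f + 1) (c :: rest) cur acc =
            PySem.Chars.splitOn.go ['/'] f (List.drop ['/'].length (c :: rest)) []
              (cur.reverse :: acc) by simp [PySem.Chars.splitOn.go, hpre]]
        simp only [List.length_singleton, List.drop_succ_cons, List.drop_zero]
        rw [ih f [] (cur.reverse :: acc) (by simp at hf; omega)]
        have h1 : consHead [] (splitSlash rest) = splitSlash rest := by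
          cases h : splitSlash rest with
          | nil => exact absurd h (splitSlash_ne_nil rest)
          | cons h t => simp [consHead]
        simp only [List.reverse_nil]
        rw [h1]
        simp [splitSlash, hc, consHead]
      · have hpre : (['/'].isPrefixOf (c :: rest)) = false := by
          simp [List.isPrefixOf]
          exact fun h => absurd h.symm hc
        rw [show PySem.Chars.splitOn.go ['/'] (f + 1) (c :: rest) cur acc =
            PySem.Chars.splitOn.go ['/'] f rest (c :: cur) acc by
          simp [PySem.Chars.splitOn.go, hpre]]
        rw [ih f (c :: cur) acc (by simp at hf; omega)]
        simp only [splitSlash, if_neg hc, List.reverse_cons]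
        cases h : splitSlash rest with
        | nil => exact absurd h (splitSlash_ne_nil rest)
        | cons h t => simp [consHead]

theorem splitOn_eq (cs : List Char) :
    PySem.Chars.splitOn cs ['/'] = splitSlash cs := by
  rw [show PySem.Chars.splitOn cs ['/'] =
      PySem.Chars.splitOn.go ['/'] (cs.length + 1) cs [] [] from rfl]
  rw [splitOn_go_eq cs (cs.length + 1) [] [] (by omega)]
  cases h : splitSlash cs with
  | nil => exact absurd h (splitSlash_ne_nil cs)
  | cons h t => simp [consHead]

-- '/'.join undoes the split
theorem join_splitSlash (cs : List Char) :
    PySem.Chars.join ['/'] (splitSlash cs) = cs := by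
  induction cs with
  | nil => simp [splitSlash, PySem.Chars.join_singleton]
  | cons c r ih =>
    by_cases hc : c = '/'
    · subst hc
      rw [show splitSlash ('/' :: r) = [] :: splitSlash r from by simp [splitSlash]]
      cases h : splitSlash r with
      | nil => exact absurd h (splitSlash_ne_nil r)
      | cons h t =>
        rw [PySem.Chars.join_cons_cons]
        rw [h] at ih
        simp [ih]
    · simp only [splitSlash, if_neg hc]
      cases h : splitSlash r with
      | nil => exact absurd h (splitSlash_ne_nil r)
      | cons h t =>
        rw [h] at ih
        cases t with
        | nil => simp_all [PySem.Chars.join_singleton]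
        | cons u v =>
          rw [PySem.Chars.join_cons_cons]
          rw [PySem.Chars.join_cons_cons] at ih
          simp [ih]

-- the pieces after the k-th slash rejoin to the suffix from the k-th slash
theorem splitSlash_spec (cs : List Char) : ∀ (k : Nat), 1 ≤ k →
    (match nthSlash cs k with
     | some j => k < (splitSlash cs).length ∧
         '/' :: PySem.Chars.join ['/'] ((splitSlash cs).drop k) = cs.drop j
     | none => (splitSlash cs).length ≤ k) := by
  induction cs with
  | nil => intro k hk; simp [nthSlash, splitSlash]; omega
  | cons c r ih =>
    intro k hk
    by_cases hc : c = '/'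
    · by_cases h1 : k = 1
      · subst h1
        have : nthSlash (c :: r) 1 = some 0 := by simp [nthSlash, hc]
        rw [this]
        have hlen : 1 ≤ (splitSlash r).length :=
          List.length_pos_of_ne_nil (splitSlash_ne_nil r)
        constructor
        · simp [splitSlash, hc]; omega
        · simp only [splitSlash, if_pos hc, List.drop_succ_cons, List.drop_zero]
          rw [join_splitSlash r, hc]
      · have hk2 : 2 ≤ k := by omega
        have hred : nthSlash (c :: r) k = (nthSlash r (k - 1)).map (· + 1) := by
          simp [nthSlash, hc]; omega
        rw [hred]
        have := ih (k - 1) (by omega)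
        cases hr : nthSlash r (k - 1) with
        | some j =>
          rw [hr] at this
          simp only [Option.map_some]
          constructor
          · simp only [splitSlash, if_pos hc, List.length_cons]; omega
          · have hdrop : (splitSlash (c :: r)).drop k = (splitSlash r).drop (k - 1) := by
              simp only [splitSlash, if_pos hc]
              have hke : k = (k - 1) + 1 := by omega
              rw [hke, List.drop_succ_cons]
              congr 1
            rw [hdrop, this.2]
            simp
        | none =>
          rw [hr] at this
          simp only [Option.map_none]
          simp only [splitSlash, if_pos hc, List.length_cons]
          omega
    · have hred : nthSlash (c :: r) k = (nthSlash r k).map (· + 1) := by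
        simp [nthSlash, hc]
      rw [hred]
      have := ih k hk
      have hlen : (splitSlash (c :: r)).length = (splitSlash r).length := by
        simp only [splitSlash, if_neg hc]
        cases h : splitSlash r with
        | nil => exact absurd h (splitSlash_ne_nil r)
        | cons h t => simp
      have hdrop : (splitSlash (c :: r)).drop k = (splitSlash r).drop k := by
        simp only [splitSlash, if_neg hc]
        cases h : splitSlash r with
        | nil => exact absurd h (splitSlash_ne_nil r)
        | cons h t =>
          have : k = (k - 1) + 1 := by omega
          rw [this, List.drop_succ_cons, List.drop_succ_cons]
      cases hr : nthSlash r k with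
      | some j =>
        rw [hr] at this
        simp only [Option.map_some]
        refine ⟨by omega, ?_⟩
        rw [hdrop, this.2]
        simp
      | none =>
        rw [hr] at this
        simp only [Option.map_none]
        omega

theorem alt_eq (cs : List Char) :
    (let parts := PySem.Chars.splitOn cs ['/']
     if 3 < parts.length then
       String.ofList ('/' :: PySem.Chars.join ['/'] (PySem.List.slice parts (some 3) none))
     else if !cs.isEmpty && !(PySem.Chars.endswith cs ['/']) then "/"
     else "") = refSub cs := by
  simp only [splitOn_eq]
  have hspec := splitSlash_spec cs 3 (by omega)
  cases h3 : nthSlash cs 3 with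
  | some j =>
    rw [h3] at hspec
    rw [if_pos hspec.1]
    simp only [refSub, h3]
    rw [show ((3 : Int) = ((3 : Nat) : Int)) from rfl, PySem.List.slice_from_natCast]
    rw [show ('/' :: PySem.Chars.join ['/'] ((splitSlash cs).drop 3)) = cs.drop j from hspec.2]
  | none =>
    rw [h3] at hspec
    have hlen : (splitSlash cs).length ≤ 3 := hspec
    rw [if_neg (by omega)]
    simp only [refSub, h3]
    by_cases hcs : cs = []
    · subst hcs; simp
    · have hne : cs.isEmpty = false := by simp [hcs]
      by_cases hlast : cs.getLast? = some '/'
      · have he : PySem.Chars.endswith cs ['/'] = true := (endswith_slash_iff cs).mpr hlast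
        simp [he, hlast]
      · have he : PySem.Chars.endswith cs ['/'] = false := by
          rw [← Bool.not_eq_true]
          simp only [endswith_slash_iff]
          exact hlast
        simp [he, hne, hcs, hlast]

-- ===== VERDICT (by name: the statement is the Claim_ definition above) =====
theorem get_subdirectory_spec : Claim_equal_get_subdirectory := by
  intro url _
  unfold Spec_get_subdirectory get_subdirectory get_subdirectory_alt
  exact (a_eq url.toList).trans (alt_eq url.toList).symm
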